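-- pv_equiv track=rewrite | github.com/hithyi02011/Sie | app.py | build_child_families
-- ===== SOURCE A (Python) =====
-- def get_person_map(people):
--     return {p["id"]: p for p in people}
--
-- def build_child_families(people):
--     """
--     child_fams[(father_id, mother_id)] = [child_ids...]
--     """
--     person_map = get_person_map(people)
--
--     def child_sort_key(cid):
--         bo = person_map[cid].get("birth_order")
--         return (bo is None, bo if bo is not None else 999999, cid)
--
--     fams = {}
--     for p in people:
--         fid, mid = p.get("father_id"), p.get("mother_id")
--         if fid and mid:
--             fams.setdefault((fid, mid), []).append(p["id"])
--
--     for k in fams: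
--         fams[k] = sorted(fams[k], key=child_sort_key)
--     return fams
-- ===== SOURCE B (Python) =====
-- def build_child_families(people):
--     """
--     child_fams[(father_id, mother_id)] = [child_ids...]
--
--     One global sort instead of a sort per family: collect every (parents, child)
--     pair, sort the pairs once by the child sort key, then distribute the children
--     into buckets (created in first-occurrence order) in a single stable pass, so
--     each bucket comes out already sorted.
--     """
--     person_map = {p["id"]: p for p in people}
--
--     def child_sort_key(cid):
--         bo = person_map[cid].get("birth_order")
--         return (bo is None, bo if bo is not None else 999999, cid)
--
--     kids = [((p.get("father_id"), p.get("mother_id")), p["id"])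
--             for p in people
--             if p.get("father_id") and p.get("mother_id")]
--     fams = {k: [] for k, _ in kids}
--     for k, cid in sorted(kids, key=lambda kc: child_sort_key(kc[1])):
--         fams[k].append(cid)
--     return fams
-- ===== Notes on version B (the rewrite author's own statement) =====
-- stated objective: alternative
-- what changed: Instead of grouping the children per (father_id, mother_id) and then sorting each family's list separately, B sorts the whole (parents, child) pair list once by the same child_sort_key and distributes the children stably into buckets created in first-occurrence order, so every bucket comes out already sorted with no per-family sorts.
import Mathlib
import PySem

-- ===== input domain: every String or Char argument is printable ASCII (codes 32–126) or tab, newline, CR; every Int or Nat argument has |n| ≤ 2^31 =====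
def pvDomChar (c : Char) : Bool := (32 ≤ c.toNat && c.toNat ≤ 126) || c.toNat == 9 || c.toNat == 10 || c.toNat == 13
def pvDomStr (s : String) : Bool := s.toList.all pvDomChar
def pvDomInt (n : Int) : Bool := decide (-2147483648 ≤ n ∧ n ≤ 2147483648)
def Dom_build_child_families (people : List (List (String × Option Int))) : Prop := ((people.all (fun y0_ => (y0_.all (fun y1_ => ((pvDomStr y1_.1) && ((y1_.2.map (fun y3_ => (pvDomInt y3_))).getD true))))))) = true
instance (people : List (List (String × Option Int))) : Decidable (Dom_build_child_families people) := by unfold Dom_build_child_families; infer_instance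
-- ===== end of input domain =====

-- B replaces A's "group the children, then sort each family's list" by "sort all
-- (parents, child) pairs once by the same key, then distribute them stably into
-- buckets created in first-occurrence order" — one global sort, no per-family sorts
-- (objective: alternative decomposition; equal return value, proved below).

-- ===== PORT A =====
-- Shared vocabulary of both Pythons (both contain the same person_map comprehension
-- and the same inner child_sort_key function):
-- p.get(k): None both when the key is absent and when the stored value is None
def pvGet (p : List (String × Option Int)) (k : String) : Option Int :=
  ((PySem.Dict.mk p).get? k).getD none

-- {p["id"]: p for p in people}; p["id"] raises KeyError when "id" is absent —
-- those inputs are excluded by Pre_ below, so the `.getD none` totalisation is never hit there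
def pvPersonMap (people : List (List (String × Option Int))) :
    PySem.Dict (Option Int) (List (String × Option Int)) :=
  people.foldl (fun d p => d.insert (pvGet p "id") p) PySem.Dict.empty

-- child_sort_key(cid) = (bo is None, bo if bo is not None else 999999, cid),
-- Python's lexicographic tuple order = Lex with False<True encoded as 0<1
def pvKey (pm : PySem.Dict (Option Int) (List (String × Option Int))) (cid : Int) :
    Lex (Int × Lex (Int × Int)) :=
  let bo := pvGet ((pm.get? (some cid)).getD []) "birth_order"
  toLex ((if bo = none then 1 else 0 : Int), toLex (bo.getD 999999, cid))

def build_child_families (people : List (List (String × Option Int))) : List (Int × Int × List Int) :=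
  let pm := pvPersonMap people
  -- for p in people: if fid and mid: fams.setdefault((fid, mid), []).append(p["id"])
  -- (modify k [] (· ++ [cid]) is exactly setdefault-then-append on a PySem.Dict)
  let fams : PySem.Dict (Int × Int) (List Int) :=
    people.foldl (fun d p =>
      let fid := pvGet p "father_id"
      let mid := pvGet p "mother_id"
      if (fid.getD 0 != 0) && (mid.getD 0 != 0) then
        d.modify (fid.getD 0, mid.getD 0) [] (· ++ [(pvGet p "id").getD 0])
      else d) PySem.Dict.empty
  -- for k in fams: fams[k] = sorted(fams[k], key=child_sort_key)
  let fams2 := fams.keys.foldl (fun d k => d.insert k (PySem.List.sorted (d.getD k []) (pvKey pm))) fams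
  fams2.items.map (fun kv => (kv.1.1, kv.1.2, kv.2))

-- ===== PORT B =====
-- if p.get("father_id") and p.get("mother_id")
def pvCond (p : List (String × Option Int)) : Bool :=
  ((pvGet p "father_id").getD 0 != 0) && ((pvGet p "mother_id").getD 0 != 0)

-- ((p.get("father_id"), p.get("mother_id")), p["id"])
def pvKid (p : List (String × Option Int)) : (Int × Int) × Int :=
  (((pvGet p "father_id").getD 0, (pvGet p "mother_id").getD 0), (pvGet p "id").getD 0)

def build_child_families_alt (people : List (List (String × Option Int))) : List (Int × Int × List Int) :=
  let pm := pvPersonMap people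
  -- kids = [((fid, mid), cid) for p in people if fid and mid]
  let kids := (people.filter pvCond).map pvKid
  -- fams = {k: [] for k, _ in kids}
  let fams0 := kids.foldl (fun d kc => d.insert kc.1 ([] : List Int)) PySem.Dict.empty
  -- for k, cid in sorted(kids, key=...): fams[k].append(cid)
  let fams := (PySem.List.sorted kids (fun kc => pvKey pm kc.2)).foldl
      (fun d kc => d.modify kc.1 [] (· ++ [kc.2])) fams0
  fams.items.map (fun kv => (kv.1.1, kv.1.2, kv.2))

-- ===== PRECONDITION & SPEC =====
-- Pre_ excludes people missing an "id" key (A raises KeyError building person_map) and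
-- people with id None that have two truthy parent ids (A then returns lists containing
-- None, which is not a value of the declared List Int type).
def Pre_build_child_families (people : List (List (String × Option Int))) : Prop :=
  (people.all (fun p =>
    ((PySem.Dict.mk p).get? "id").isSome &&
    (!(pvCond p) || (((PySem.Dict.mk p).get? "id").getD none).isSome))) = true
instance (people : List (List (String × Option Int))) : Decidable (Pre_build_child_families people) := by unfold Pre_build_child_families; infer_instance
def pvWitness_build_child_families : (List (List (String × Option Int))) :=
  [[("id", some 1), ("father_id", some 2), ("mother_id", some 3), ("birth_order", none)],
   [("id", some 4), ("father_id", some 2), ("mother_id", some 3), ("birth_order", some 1)],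
   [("id", some 2)]]

def Spec_build_child_families (people : List (List (String × Option Int))) (out : List (Int × Int × List Int)) : Prop := out = build_child_families_alt people
instance (people : List (List (String × Option Int))) (out : List (Int × Int × List Int)) : Decidable (Spec_build_child_families people out) := by unfold Spec_build_child_families; infer_instance

-- ===== CLAIM (what is proved, stated in full; the proofs are below) =====
def Claim_equal_build_child_families : Prop := ∀ (people : List (List (String × Option Int))), Dom_build_child_families people → Pre_build_child_families people → Spec_build_child_families people (build_child_families people)

-- ===== LEMMAS AND PROOFS =====

-- abbreviations for the proofs
def pvBucket (M : List ((Int × Int) × Int)) (k : Int × Int) : List Int :=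
  (M.filter (fun kc => kc.1 == k)).map (fun kc => kc.2)

def pvF (d : PySem.Dict (Int × Int) (List Int)) (M : List ((Int × Int) × Int)) :
    PySem.Dict (Int × Int) (List Int) :=
  M.foldl (fun d kc => d.modify kc.1 [] (· ++ [kc.2])) d

-- A's grouping loop over people IS pvF over the kids list
theorem pvA_loop_eq_pvF (people : List (List (String × Option Int)))
    (d : PySem.Dict (Int × Int) (List Int)) :
    people.foldl (fun d p =>
      let fid := pvGet p "father_id"
      let mid := pvGet p "mother_id"
      if (fid.getD 0 != 0) && (mid.getD 0 != 0) then
        d.modify (fid.getD 0, mid.getD 0) [] (· ++ [(pvGet p "id").getD 0])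
      else d) d
    = pvF d ((people.filter pvCond).map pvKid) := by
  unfold pvF
  rw [List.foldl_map, List.foldl_filter]
  simp only [pvCond, pvKid]

theorem getD_pvF (M : List ((Int × Int) × Int)) (d : PySem.Dict (Int × Int) (List Int))
    (k : Int × Int) : (pvF d M).getD k [] = d.getD k [] ++ pvBucket M k := by
  induction M generalizing d with
  | nil => simp [pvF, pvBucket]
  | cons kc M ih =>
    simp only [pvF, List.foldl_cons] at ih ⊢
    rw [ih]
    by_cases h : kc.1 = k
    · simp [pvBucket, h]
    · simp [pvBucket, PySem.Dict.getD_modify, h, Ne.symm h]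

theorem keys_dictInsert (d : PySem.Dict (Int × Int) (List Int)) (k : Int × Int) (v : List Int) :
    (d.insert k v).keys = PySem.Set.add d.keys k := by
  by_cases h : d.contains k = true
  · rw [PySem.Dict.keys_insert_of_contains d v h,
      PySem.Set.add_of_mem ((PySem.Dict.contains_iff_mem_keys d k).mp h)]
  · rw [PySem.Dict.keys_insert_of_not_contains d v (by simpa using h),
      PySem.Set.add_of_not_mem (fun hm => h ((PySem.Dict.contains_iff_mem_keys d k).mpr hm))]

theorem keys_dictModify (d : PySem.Dict (Int × Int) (List Int)) (k : Int × Int)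
    (f : List Int → List Int) : (d.modify k [] f).keys = PySem.Set.add d.keys k := by
  rw [PySem.Dict.keys_modify, keys_dictInsert]

theorem keys_pvF (M : List ((Int × Int) × Int)) (d : PySem.Dict (Int × Int) (List Int)) :
    (pvF d M).keys = PySem.Set.update d.keys (M.map (fun kc => kc.1)) := by
  induction M generalizing d with
  | nil => simp [pvF, PySem.Set.update]
  | cons kc M ih =>
    simp only [pvF, List.foldl_cons, List.map_cons] at ih ⊢
    rw [ih, keys_dictModify, PySem.Set.update_cons]

theorem keys_pvInsertNil (M : List ((Int × Int) × Int)) (d : PySem.Dict (Int × Int) (List Int)) :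
    (M.foldl (fun d kc => d.insert kc.1 ([] : List Int)) d).keys
      = PySem.Set.update d.keys (M.map (fun kc => kc.1)) := by
  induction M generalizing d with
  | nil => simp [PySem.Set.update]
  | cons kc M ih =>
    simp only [List.foldl_cons, List.map_cons]
    rw [ih, keys_dictInsert, PySem.Set.update_cons]

theorem getD_pvInsertNil (M : List ((Int × Int) × Int)) (d : PySem.Dict (Int × Int) (List Int))
    (hd : ∀ k, d.getD k [] = []) (k : Int × Int) :
    (M.foldl (fun d kc => d.insert kc.1 ([] : List Int)) d).getD k [] = [] := by
  induction M generalizing d with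
  | nil => simpa using hd k
  | cons kc M ih =>
    simp only [List.foldl_cons]
    exact ih _ (fun k' => by rw [PySem.Dict.getD_insert]; split <;> simp [hd])

-- items of a dict with nodup keys from keys + getD
theorem items_eq_keys_map (d : PySem.Dict (Int × Int) (List Int)) (hnd : d.keys.Nodup) :
    d.items = d.keys.map (fun k => (k, d.getD k [])) := by
  have hk : d.keys = d.items.map (fun p => p.1) := rfl
  rw [hk, List.map_map]
  symm
  conv_rhs => rw [← List.map_id d.items]
  refine List.map_congr_left (fun p hp => ?_)
  have : d.getD p.1 [] = p.2 := PySem.Dict.getD_of_mem_items d (by simpa using hp) hnd []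
  simp [Function.comp, this]

-- the per-key sorting pass: keys unchanged, every listed key's value sorted once
theorem sortEach_spec (key : Int → Lex (Int × Lex (Int × Int)))
    (ks : List (Int × Int)) (d : PySem.Dict (Int × Int) (List Int))
    (hnd : ks.Nodup) (hmem : ∀ k ∈ ks, k ∈ d.keys) :
    (ks.foldl (fun d k => d.insert k (PySem.List.sorted (d.getD k []) key)) d).keys = d.keys ∧
    ∀ k, (ks.foldl (fun d k => d.insert k (PySem.List.sorted (d.getD k []) key)) d).getD k []
      = if k ∈ ks then PySem.List.sorted (d.getD k []) key else d.getD k [] := by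
  induction ks generalizing d with
  | nil => simp
  | cons k0 ks ih =>
    simp only [List.foldl_cons]
    have hc : d.contains k0 = true :=
      (PySem.Dict.contains_iff_mem_keys d k0).mpr (hmem k0 (by simp))
    have hkeys : (d.insert k0 (PySem.List.sorted (d.getD k0 []) key)).keys = d.keys :=
      PySem.Dict.keys_insert_of_contains d _ hc
    have hnd' := hnd.of_cons
    have hk0 : k0 ∉ ks := by simpa using (List.nodup_cons.mp hnd).1
    obtain ⟨ihk, ihg⟩ := ih (d.insert k0 (PySem.List.sorted (d.getD k0 []) key)) hnd'
      (fun k hk => by rw [hkeys]; exact hmem k (by simp [hk]))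
    refine ⟨by rw [ihk, hkeys], fun k => ?_⟩
    rw [ihg k]
    by_cases hks : k ∈ ks
    · have hne : k ≠ k0 := fun h => hk0 (h ▸ hks)
      simp [hks, PySem.Dict.getD_insert, hne]
    · by_cases hk : k = k0
      · subst hk; simp [hks]
      · simp [hks, hk, PySem.Dict.getD_insert]

-- ---- stability of PySem's sort: filter commutes with sorted ----
theorem insertBy_of_forall_before {α : Type} (b : α → α → Bool) (x : α) (m : List α)
    (h : ∀ z ∈ m, b x z = true) : PySem.List.insertBy b x m = x :: m := by
  cases m with
  | nil => simp [PySem.List.insertBy]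
  | cons y ys => simp [PySem.List.insertBy, h y (by simp)]

theorem filter_insertBy {α κ : Type} [LinearOrder κ] (key : α → κ) (P : α → Bool) (x : α)
    (m : List α) (hm : m.Pairwise (fun a b => key a ≤ key b)) :
    (PySem.List.insertBy (fun a b => decide (key a < key b)) x m).filter P
      = if P x then PySem.List.insertBy (fun a b => decide (key a < key b)) x (m.filter P)
        else m.filter P := by
  induction m with
  | nil => by_cases hP : P x <;> simp [PySem.List.insertBy, List.filter, hP]
  | cons y ys ih =>
    obtain ⟨hy, hys⟩ := List.pairwise_cons.mp hm
    by_cases hxy : key x < key y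
    · have hstep : PySem.List.insertBy (fun a b => decide (key a < key b)) x (y :: ys)
          = x :: y :: ys := by simp [PySem.List.insertBy, hxy]
      rw [hstep]
      by_cases hPy : P y
      · by_cases hPx : P x <;> simp [hPx, hPy, PySem.List.insertBy, hxy]
      · by_cases hPx : P x
        · have : PySem.List.insertBy (fun a b => decide (key a < key b)) x (ys.filter P)
              = x :: ys.filter P := by
            refine insertBy_of_forall_before _ _ _ (fun z hz => ?_)
            have := hy z (List.mem_of_mem_filter hz)
            simp [lt_of_lt_of_le hxy this]
          simp [hPx, hPy, this]
        · simp [hPx, hPy]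
    · have hstep : PySem.List.insertBy (fun a b => decide (key a < key b)) x (y :: ys)
          = y :: PySem.List.insertBy (fun a b => decide (key a < key b)) x ys := by
        simp [PySem.List.insertBy, hxy]
      rw [hstep]
      by_cases hPy : P y
      · by_cases hPx : P x <;>
          simp [hPy, hPx, ih hys, PySem.List.insertBy, hxy]
      · by_cases hPx : P x <;> simp [hPy, hPx, ih hys]

theorem sorted_append_singleton {α κ : Type} [LinearOrder κ] (key : α → κ) (M : List α) (x : α) :
    PySem.List.sorted (M ++ [x]) key
      = PySem.List.insertBy (fun a b => decide (key a < key b)) x (PySem.List.sorted M key) := by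
  rw [PySem.List.sorted_eq_foldl_insertBy, PySem.List.sorted_eq_foldl_insertBy,
    List.foldl_append, List.foldl_cons, List.foldl_nil]

theorem filter_sorted {α κ : Type} [LinearOrder κ] (key : α → κ) (P : α → Bool) (L : List α) :
    (PySem.List.sorted L key).filter P = PySem.List.sorted (L.filter P) key := by
  induction L using List.reverseRecOn with
  | nil => simp [PySem.List.sorted]
  | append_singleton M x ih =>
    rw [sorted_append_singleton, filter_insertBy key P x _ (PySem.List.sorted_pairwise M key),
      List.filter_append, ih]
    by_cases hPx : P x
    · rw [if_pos hPx]
      have hfx : List.filter P [x] = [x] := by simp [hPx]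
      rw [hfx, sorted_append_singleton]
    · have hfx : List.filter P [x] = [] := by simp [hPx]
      rw [if_neg (by simp [hPx]), hfx, List.append_nil]

-- ---- sorting through a projection ----
theorem map_insertBy {α β : Type} (g : α → β) (b : β → β → Bool) (x : α) (m : List α) :
    (PySem.List.insertBy (fun a c => b (g a) (g c)) x m).map g
      = PySem.List.insertBy b (g x) (m.map g) := by
  induction m with
  | nil => simp [PySem.List.insertBy]
  | cons y ys ih =>
    by_cases h : b (g x) (g y) <;> simp [PySem.List.insertBy, h, ih]

theorem map_sorted {α β κ : Type} [LinearOrder κ] (g : α → β) (key : β → κ) (M : List α) :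
    (PySem.List.sorted M (fun a => key (g a))).map g = PySem.List.sorted (M.map g) key := by
  rw [PySem.List.sorted_eq_foldl_insertBy, PySem.List.sorted_eq_foldl_insertBy, List.foldl_map]
  suffices h : ∀ (acc : List α),
      (M.foldl (fun acc a => PySem.List.insertBy (fun a c => decide (key (g a) < key (g c))) a acc) acc).map g
        = M.foldl (fun acc a => PySem.List.insertBy (fun a c => decide (key a < key c)) (g a) acc) (acc.map g) by
    simpa using h []
  induction M with
  | nil => simp
  | cons y ys ih => intro acc; simp [ih, map_insertBy g (fun a c => decide (key a < key c))]

-- the crux: each bucket of the globally sorted kid list is the sorted bucket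
theorem bucket_sorted (key : Int → Lex (Int × Lex (Int × Int))) (L : List ((Int × Int) × Int))
    (k : Int × Int) :
    pvBucket (PySem.List.sorted L (fun kc => key kc.2)) k
      = PySem.List.sorted (pvBucket L k) key := by
  unfold pvBucket
  rw [filter_sorted (fun kc => key kc.2) (fun kc => kc.1 == k) L]
  exact map_sorted (fun (kc : (Int × Int) × Int) => kc.2) key (List.filter (fun kc => kc.1 == k) L)

-- ===== VERDICT helper: the main equality =====
theorem pv_main (people : List (List (String × Option Int))) :
    build_child_families people = build_child_families_alt people := by
  unfold build_child_families build_child_families_alt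
  simp only []
  set pm := pvPersonMap people with hpm
  set L := (people.filter pvCond).map pvKid with hL
  -- A side
  rw [pvA_loop_eq_pvF]
  set fams1 := pvF PySem.Dict.empty L with hf1
  have hkeys1 : fams1.keys = PySem.Set.ofList (L.map (fun kc => kc.1)) := by
    rw [hf1, keys_pvF, PySem.Dict.keys_empty, PySem.Set.update_nil_left]
  have hnd1 : fams1.keys.Nodup := by rw [hkeys1]; exact PySem.Set.nodup_ofList _
  have hg1 : ∀ k, fams1.getD k [] = pvBucket L k := by
    intro k; rw [hf1, getD_pvF, PySem.Dict.getD_empty, List.nil_append]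
  obtain ⟨hkeys2, hg2⟩ := sortEach_spec (pvKey pm) fams1.keys fams1 hnd1 (fun k hk => hk)
  set fams2 := fams1.keys.foldl
    (fun d k => d.insert k (PySem.List.sorted (d.getD k []) (pvKey pm))) fams1 with hf2
  -- B side
  set fams0 := L.foldl (fun d kc => d.insert kc.1 ([] : List Int)) PySem.Dict.empty with hf0
  have hkeys0 : fams0.keys = PySem.Set.ofList (L.map (fun kc => kc.1)) := by
    rw [hf0, keys_pvInsertNil, PySem.Dict.keys_empty, PySem.Set.update_nil_left]
  have hg0 : ∀ k, fams0.getD k [] = [] := by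
    intro k; rw [hf0]; exact getD_pvInsertNil L _ (fun k' => PySem.Dict.getD_empty k' []) k
  set SL := PySem.List.sorted L (fun kc => pvKey pm kc.2) with hSL
  set famsB := SL.foldl (fun d kc => d.modify kc.1 [] (· ++ [kc.2])) fams0 with hfB
  have hfBF : famsB = pvF fams0 SL := rfl
  have hkeysB : famsB.keys = fams0.keys := by
    rw [hfBF, keys_pvF, PySem.Set.update_eq_append_filter, List.filter_eq_nil_iff.mpr, List.append_nil]
    intro a ha
    have ha' : a ∈ SL.map (fun kc => kc.1) := (PySem.Set.mem_ofList _ _).mp ha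
    obtain ⟨kc, hkc, rfl⟩ := List.mem_map.mp ha'
    have : kc ∈ L := (PySem.List.mem_sorted L _ false kc).mp hkc
    have : kc.1 ∈ fams0.keys := by
      rw [hkeys0]
      exact (PySem.Set.mem_ofList _ _).mpr (List.mem_map.mpr ⟨kc, this, rfl⟩)
    simp [this]
  have hndB : famsB.keys.Nodup := by rw [hkeysB, hkeys0]; exact PySem.Set.nodup_ofList _
  have hgB : ∀ k, famsB.getD k [] = pvBucket SL k := by
    intro k; rw [hfBF, getD_pvF, hg0, List.nil_append]
  have hnd2 : fams2.keys.Nodup := by rw [hkeys2]; exact hnd1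
  -- items of both final dicts
  rw [items_eq_keys_map fams2 hnd2, items_eq_keys_map famsB hndB,
    hkeys2, hkeysB, hkeys0, ← hkeys1]
  refine congrArg _ (List.map_congr_left (fun k hk => ?_))
  rw [hg2 k, if_pos hk, hg1 k, hgB k, hSL, bucket_sorted]

-- ===== VERDICT (by name: the statement is the Claim_ definition above) =====
theorem build_child_families_spec : Claim_equal_build_child_families := by
  intro people _ _
  unfold Spec_build_child_families
  exact pv_main people
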